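-- pv_equiv track=rewrite | github.com/dr4Nx/sieve | log_query/safety.py | _strip_quoted_sections
-- ===== SOURCE A (Python) =====
-- def _strip_quoted_sections(text: str) -> str:
--     out = []
--     in_single = False
--     in_double = False
--     escape = False
--     for ch in text:
--         if escape:
--             out.append(" " if (in_single or in_double) else ch)
--             escape = False
--             continue
--         if ch == "\\" and in_double:
--             escape = True
--             out.append(" " if in_double else ch)
--             continue
--         if ch == "'" and not in_double:
--             in_single = not in_single
--             out.append(" ")
--             continue
--         if ch == '"' and not in_single:
--             in_double = not in_double
--             out.append(" ")
--             continue
--         out.append(" " if (in_single or in_double) else ch)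
--     return "".join(out)
-- ===== SOURCE B (Python) =====
-- def _strip_quoted_sections(text: str) -> str:
--     n = len(text)
--     pieces = []
--     i = 0
--     while i < n:
--         ch = text[i]
--         if ch == "'":
--             j = text.find("'", i + 1)
--             end = n if j < 0 else j + 1
--         elif ch == '"':
--             j = i + 1
--             while j < n and text[j] != '"':
--                 j += 2 if text[j] == "\\" else 1
--             end = min(j + 1, n)
--         else:
--             pieces.append(ch)
--             i += 1
--             continue
--         pieces.append(" " * (end - i))
--         i = end
--     return "".join(pieces)
-- ===== Notes on version B (the rewrite author's own statement) =====
-- stated objective: alternative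
-- what changed: Replaces A's per-character boolean state machine (in_single/in_double/escape flags updated on every char) with a region-skipping scan that, on meeting an opening quote, finds the closing quote in one inner scan (str.find for single quotes, an escape-aware index hop for double quotes) and blanks the whole region at once.
import Mathlib
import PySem

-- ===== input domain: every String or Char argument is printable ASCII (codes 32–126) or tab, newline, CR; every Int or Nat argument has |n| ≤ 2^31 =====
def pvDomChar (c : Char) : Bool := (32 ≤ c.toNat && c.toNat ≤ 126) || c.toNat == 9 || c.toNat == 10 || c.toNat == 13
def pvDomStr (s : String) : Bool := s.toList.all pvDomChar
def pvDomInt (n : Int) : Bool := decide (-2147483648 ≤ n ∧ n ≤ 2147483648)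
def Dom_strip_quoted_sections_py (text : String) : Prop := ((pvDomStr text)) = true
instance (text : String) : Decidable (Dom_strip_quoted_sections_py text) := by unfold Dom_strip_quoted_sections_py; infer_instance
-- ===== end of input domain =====

-- B replaces A's per-character boolean state machine by a region-skipping scan
-- (find the closing quote, blank the whole quoted region at once); objective: alternative.

-- ===== PORT A =====
-- one fold step per character over A's state (out, in_single, in_double, escape)
def pvStepA (st : List Char × Bool × Bool × Bool) (ch : Char) :
    List Char × Bool × Bool × Bool :=
  let (out, in_single, in_double, escape) := st
  if escape then
    (out ++ [if in_single || in_double then ' ' else ch], in_single, in_double, false)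
  else if ch == '\\' && in_double then
    (out ++ [if in_double then ' ' else ch], in_single, in_double, true)
  else if ch == '\'' && !in_double then
    (out ++ [' '], !in_single, in_double, escape)
  else if ch == '"' && !in_single then
    (out ++ [' '], in_single, !in_double, escape)
  else
    (out ++ [if in_single || in_double then ' ' else ch], in_single, in_double, escape)

def strip_quoted_sections_py (text : String) : String :=
  String.ofList (text.toList.foldl pvStepA ([], false, false, false)).1

-- ===== PORT B =====
-- chars after an opening ' up to and including the closing ' (or all of them, if unterminated)
def pvSkipSingle : List Char → Nat
  | [] => 0
  | c :: rest => if c == '\'' then 1 else 1 + pvSkipSingle rest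

-- same for an opening ", honouring backslash escapes
def pvSkipDouble : List Char → Nat
  | [] => 0
  | c :: rest =>
    if c == '\\' then
      match rest with
      | [] => 1
      | _ :: r => 2 + pvSkipDouble r
    else if c == '"' then 1
    else 1 + pvSkipDouble rest

def pvAltGo : List Char → List Char
  | [] => []
  | c :: rest =>
    if c == '\'' then
      List.replicate (pvSkipSingle rest + 1) ' ' ++ pvAltGo (rest.drop (pvSkipSingle rest))
    else if c == '"' then
      List.replicate (pvSkipDouble rest + 1) ' ' ++ pvAltGo (rest.drop (pvSkipDouble rest))
    else
      c :: pvAltGo rest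
termination_by l => l.length
decreasing_by
  · simp only [List.length_cons, List.length_drop]; omega
  · simp only [List.length_cons, List.length_drop]; omega
  · simp

def strip_quoted_sections_py_alt (text : String) : String :=
  String.ofList (pvAltGo text.toList)

-- ===== PRECONDITION & SPEC =====
def Spec_strip_quoted_sections_py (text : String) (out : String) : Prop := out = strip_quoted_sections_py_alt text
instance (text : String) (out : String) : Decidable (Spec_strip_quoted_sections_py text out) := by unfold Spec_strip_quoted_sections_py; infer_instance

-- ===== CLAIM (what is proved, stated in full; the proofs are below) =====
def Claim_equal_strip_quoted_sections_py : Prop := ∀ (text : String), Dom_strip_quoted_sections_py text → Spec_strip_quoted_sections_py text (strip_quoted_sections_py text)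

-- ===== LEMMAS AND PROOFS =====

-- evaluation of one step of A in each reachable state
theorem pvStepA_n_sq (out : List Char) :
    pvStepA (out, false, false, false) '\'' = (out ++ [' '], true, false, false) := by
  simp [pvStepA]
theorem pvStepA_n_dq (out : List Char) :
    pvStepA (out, false, false, false) '"' = (out ++ [' '], false, true, false) := by
  simp [pvStepA]
theorem pvStepA_n_other (out : List Char) (c : Char) (hc : ¬c = '\'') (hq : ¬c = '"') :
    pvStepA (out, false, false, false) c = (out ++ [c], false, false, false) := by
  simp [pvStepA, hc, hq]
theorem pvStepA_s_close (out : List Char) :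
    pvStepA (out, true, false, false) '\'' = (out ++ [' '], false, false, false) := by
  simp [pvStepA]
theorem pvStepA_s_other (out : List Char) (c : Char) (hc : ¬c = '\'') :
    pvStepA (out, true, false, false) c = (out ++ [' '], true, false, false) := by
  simp [pvStepA, hc]
theorem pvStepA_d_bs (out : List Char) :
    pvStepA (out, false, true, false) '\\' = (out ++ [' '], false, true, true) := by
  simp [pvStepA]
theorem pvStepA_d_esc (out : List Char) (c : Char) :
    pvStepA (out, false, true, true) c = (out ++ [' '], false, true, false) := by
  simp [pvStepA]
theorem pvStepA_d_close (out : List Char) :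
    pvStepA (out, false, true, false) '"' = (out ++ [' '], false, false, false) := by
  simp [pvStepA]
theorem pvStepA_d_other (out : List Char) (c : Char) (hb : ¬c = '\\') (hq : ¬c = '"') :
    pvStepA (out, false, true, false) c = (out ++ [' '], false, true, false) := by
  simp [pvStepA, hb, hq]

theorem pvRep_succ (k : Nat) (out : List Char) :
    out ++ [' '] ++ List.replicate k ' ' = out ++ List.replicate (k + 1) ' ' := by
  simp [List.replicate_succ, List.append_assoc]

-- inside a single-quoted region A blanks every char and leaves it at the closing '
theorem pvFoldSingle (l : List Char) (out : List Char) :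
    (l.foldl pvStepA (out, true, false, false)).1 =
      ((l.drop (pvSkipSingle l)).foldl pvStepA
        (out ++ List.replicate (pvSkipSingle l) ' ', false, false, false)).1 := by
  induction l generalizing out with
  | nil => simp [pvSkipSingle]
  | cons c rest ih =>
    by_cases hc : c = '\''
    · subst hc
      have hsk : pvSkipSingle ('\'' :: rest) = 1 := by simp [pvSkipSingle]
      rw [hsk, List.foldl_cons, pvStepA_s_close, List.drop_succ_cons, List.drop_zero,
        List.replicate_one]
    · have hsk : pvSkipSingle (c :: rest) = pvSkipSingle rest + 1 := by
        simp [pvSkipSingle, hc, Nat.add_comm]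
      rw [hsk, List.foldl_cons, pvStepA_s_other out c hc, List.drop_succ_cons, ih, pvRep_succ]

-- inside a double-quoted region A blanks every char (escapes included) and leaves at the closing "
theorem pvFoldDouble (l : List Char) (out : List Char) :
    (l.foldl pvStepA (out, false, true, false)).1 =
      ((l.drop (pvSkipDouble l)).foldl pvStepA
        (out ++ List.replicate (pvSkipDouble l) ' ', false, false, false)).1 := by
  induction l using pvSkipDouble.induct generalizing out with
  | case1 => simp [pvSkipDouble]
  | case2 c h =>
    have hc : c = '\\' := by simpa using h
    subst hc
    have hsk : pvSkipDouble ['\\'] = 1 := by simp [pvSkipDouble]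
    rw [hsk, List.foldl_cons, pvStepA_d_bs, List.foldl_nil, List.drop_succ_cons,
      List.drop_zero, List.foldl_nil, List.replicate_one]
  | case3 c hbs d r ih =>
    have hc : c = '\\' := by simpa using hbs
    subst hc
    have hsk : pvSkipDouble ('\\' :: d :: r) = pvSkipDouble r + 1 + 1 := by
      simp [pvSkipDouble]; omega
    rw [hsk, List.foldl_cons, pvStepA_d_bs, List.foldl_cons, pvStepA_d_esc,
      List.drop_succ_cons, List.drop_succ_cons, ih, pvRep_succ, pvRep_succ]
  | case4 c rest hb hq =>
    have hc : c = '"' := by simpa using hq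
    subst hc
    have hsk : pvSkipDouble ('"' :: rest) = 1 := by
      rw [pvSkipDouble.eq_def]; simp
    rw [hsk, List.foldl_cons, pvStepA_d_close, List.drop_succ_cons, List.drop_zero,
      List.replicate_one]
  | case5 c rest hb hq ih =>
    have hb' : ¬c = '\\' := by simpa using hb
    have hq' : ¬c = '"' := by simpa using hq
    have hsk : pvSkipDouble (c :: rest) = pvSkipDouble rest + 1 := by
      rw [pvSkipDouble.eq_def]; simp [hb, hq, Nat.add_comm]
    rw [hsk, List.foldl_cons, pvStepA_d_other out c hb' hq', List.drop_succ_cons, ih,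
      pvRep_succ]

theorem pvMain (l : List Char) (out : List Char) :
    (l.foldl pvStepA (out, false, false, false)).1 = out ++ pvAltGo l := by
  induction l using pvAltGo.induct generalizing out with
  | case1 => simp [pvAltGo]
  | case2 c rest hc ih =>
    have hc' : c = '\'' := by simpa using hc
    subst hc'
    rw [List.foldl_cons, pvStepA_n_sq, pvFoldSingle, pvRep_succ, ih]
    simp [pvAltGo, List.append_assoc]
  | case3 c rest hc hq ih =>
    have hq' : c = '"' := by simpa using hq
    subst hq'
    rw [List.foldl_cons, pvStepA_n_dq, pvFoldDouble, pvRep_succ, ih]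
    simp [pvAltGo, List.append_assoc]
  | case4 c rest hc hq ih =>
    have hc' : ¬c = '\'' := by simpa using hc
    have hq' : ¬c = '"' := by simpa using hq
    rw [List.foldl_cons, pvStepA_n_other out c hc' hq', ih]
    simp [pvAltGo, hc', hq']

-- ===== VERDICT (by name: the statement is the Claim_ definition above) =====
theorem strip_quoted_sections_py_spec : Claim_equal_strip_quoted_sections_py := by
  intro text _
  unfold Spec_strip_quoted_sections_py strip_quoted_sections_py strip_quoted_sections_py_alt
  rw [pvMain]
  simp
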